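-- pv_equiv track=rewrite | github.com/drmaniak/Leetcode | Sorting/insertion_sort.py | insertion_sort_states
-- ===== SOURCE A (Python) =====
-- from typing import List, Tuple
--
-- def insertion_sort_states(pairs: List[Tuple[int, str]]) -> List[List[Tuple[int, str]]]:
--     """
--     Perform insertion sort on a list of (key, value) pairs and return the state of
--     the array after each insertion step.
--
--     Args:
--         pairs: A list of (int, str) tuples to sort by key.
--
--     Returns:
--         A list of array states representing the list after each insertion step.
--     """
--     # Your solution here
--
--     out = []
--
--     n = len(pairs)
--
--     if not pairs:
--         return out
--
--     if len(pairs) == 1: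
--         return [pairs.copy()]
--
--     out.append(pairs.copy())
--
--     for i in range(1, n):
--         N = i
--         P = i - 1
--         while P >= 0 and (pairs[N][0] < pairs[P][0]):
--             tmp = pairs[P]
--             pairs[P] = pairs[N]
--             pairs[N] = tmp
--
--             N -= 1
--             P -= 1
--
--         out.append(pairs.copy())
--
--     return out
-- ===== SOURCE B (Python) =====
-- from typing import List, Tuple
--
-- def _bisect_right(keys, x):
--     lo, hi = 0, len(keys)
--     while lo < hi:
--         mid = (lo + hi) // 2
--         if x < keys[mid]:
--             hi = mid
--         else:
--             lo = mid + 1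
--     return lo
--
-- def insertion_sort_states(pairs: List[Tuple[int, str]]) -> List[List[Tuple[int, str]]]:
--     if not pairs:
--         return []
--     out = [pairs.copy()]
--     for i in range(1, len(pairs)):
--         key = pairs[i]
--         pos = _bisect_right([p[0] for p in pairs[:i]], key[0])
--         pairs[pos + 1:i + 1] = pairs[pos:i]
--         pairs[pos] = key
--         out.append(pairs.copy())
--     return out
-- ===== Notes on version B (the rewrite author's own statement) =====
-- stated objective: alternative
-- what changed: Replaces A's linear bubble-left adjacent-swap inner loop with a hand-written binary search (bisect_right) for the insertion point followed by a single block shift of the sorted prefix.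
import Mathlib
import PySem

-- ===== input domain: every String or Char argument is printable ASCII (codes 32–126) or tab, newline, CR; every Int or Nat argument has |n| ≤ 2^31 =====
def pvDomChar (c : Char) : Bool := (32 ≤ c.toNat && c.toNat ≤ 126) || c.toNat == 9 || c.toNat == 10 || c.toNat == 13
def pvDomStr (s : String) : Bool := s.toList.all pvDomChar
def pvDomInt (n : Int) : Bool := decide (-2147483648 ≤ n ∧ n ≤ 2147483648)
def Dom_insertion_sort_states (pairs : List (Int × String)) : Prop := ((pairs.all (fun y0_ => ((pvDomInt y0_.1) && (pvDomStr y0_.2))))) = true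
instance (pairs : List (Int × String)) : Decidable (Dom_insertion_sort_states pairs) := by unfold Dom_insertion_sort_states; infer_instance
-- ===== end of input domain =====

-- B replaces A's linear bubble-left swap loop by a hand-written binary search for the
-- insertion point followed by a single block shift (alternative algorithm, same cost here).
-- Both A and B mutate the argument list in place in Python; the equivalence proved is about
-- the return value (the in-place final states happen to coincide as well).


-- ===== PORT A =====
-- the adjacent swap pairs[P] ↔ pairs[N] with N = P + 1
def pvSwapAdj (l : List (Int × String)) (p : Nat) : List (Int × String) :=
  (l.set p (l.getD (p + 1) (0, ""))).set (p + 1) (l.getD p (0, ""))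

-- A's inner while loop; N and P = N - 1 move in lockstep, so the recursion is on N
-- (condition 'P >= 0' is 'N ≥ 1', i.e. the N = 0 base case).
def aInner : Nat → List (Int × String) → List (Int × String)
  | 0, l => l
  | n + 1, l =>
    if (l.getD (n + 1) (0, "")).1 < (l.getD n (0, "")).1 then
      aInner n (pvSwapAdj l n)
    else l

def insertion_sort_states (pairs : List (Int × String)) : List (List (Int × String)) :=
  let n := pairs.length
  if pairs = [] then []
  else if pairs.length = 1 then [pairs]
  else
    -- for i in range(1, n): bubble pairs[i] left, out.append(pairs.copy())
    ((List.range' 1 (n - 1)).foldl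
      (fun st i =>
        let l' := aInner i st.1
        (l', st.2 ++ [l'])) (pairs, [pairs])).2

-- ===== PORT B =====
-- hand-written bisect_right from Source B
def bisectLoop (keys : List Int) (x : Int) (lo hi : Nat) : Nat :=
  if h : lo < hi then
    let mid := (lo + hi) / 2
    if x < keys.getD mid 0 then bisectLoop keys x lo mid
    else bisectLoop keys x (mid + 1) hi
  else lo
termination_by hi - lo
decreasing_by all_goals omega

-- one step of B: binary-search the insertion point in the sorted prefix pairs[:i],
-- then pairs[pos+1:i+1] = pairs[pos:i]; pairs[pos] = key
def bStep (l : List (Int × String)) (i : Nat) : List (Int × String) :=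
  let key := l.getD i (0, "")
  let pos := bisectLoop ((l.take i).map Prod.fst) key.1 0 i
  l.take pos ++ key :: ((l.take i).drop pos ++ l.drop (i + 1))

def insertion_sort_states_alt (pairs : List (Int × String)) : List (List (Int × String)) :=
  if pairs = [] then []
  else
    ((List.range' 1 (pairs.length - 1)).foldl
      (fun st i =>
        let l' := bStep st.1 i
        (l', st.2 ++ [l'])) (pairs, [pairs])).2

-- ===== PRECONDITION & SPEC =====
def Spec_insertion_sort_states (pairs : List (Int × String)) (out : List (List (Int × String))) : Prop := out = insertion_sort_states_alt pairs
instance (pairs : List (Int × String)) (out : List (List (Int × String))) : Decidable (Spec_insertion_sort_states pairs out) := by unfold Spec_insertion_sort_states; infer_instance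

-- ===== CLAIM (what is proved, stated in full; the proofs are below) =====
def Claim_equal_insertion_sort_states : Prop := ∀ (pairs : List (Int × String)), Dom_insertion_sort_states pairs → Spec_insertion_sort_states pairs (insertion_sort_states pairs)

-- ===== LEMMAS AND PROOFS =====

-- ordering used throughout: compare first components
def pvR (a b : Int × String) : Prop := a.1 ≤ b.1

def pvQ (x : Int) (a : Int × String) : Bool := decide (a.1 ≤ x)

-- sorted getD access
theorem pairwise_getD_le (keys : List Int) (hs : keys.Pairwise (· ≤ ·))
    {i j : Nat} (hij : i ≤ j) (hj : j < keys.length) :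
    keys.getD i 0 ≤ keys.getD j 0 := by
  rcases Nat.lt_or_eq_of_le hij with h | h
  · rw [List.getD_eq_getElem _ _ (lt_trans h hj), List.getD_eq_getElem _ _ hj]
    exact (List.pairwise_iff_getElem.mp hs) i j _ _ h
  · subst h; rfl

-- the binary search returns a split point: everything below ≤ x, everything at/above > x
theorem bisect_between (keys : List Int) (x : Int) (hs : keys.Pairwise (· ≤ ·)) :
    ∀ n lo hi, hi - lo ≤ n → lo ≤ hi → hi ≤ keys.length →
    (∀ j, j < lo → keys.getD j 0 ≤ x) →
    (∀ j, hi ≤ j → j < keys.length → x < keys.getD j 0) →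
    (bisectLoop keys x lo hi ≤ keys.length ∧
     (∀ j, j < bisectLoop keys x lo hi → keys.getD j 0 ≤ x) ∧
     (∀ j, bisectLoop keys x lo hi ≤ j → j < keys.length → x < keys.getD j 0)) := by
  intro n
  induction n with
  | zero =>
    intro lo hi hfuel hlohi hlen hlo hhi
    have h : ¬ lo < hi := by omega
    rw [bisectLoop, dif_neg h]
    exact ⟨by omega, hlo, fun j hj hjl => hhi j (by omega) hjl⟩
  | succ n ih =>
    intro lo hi hfuel hlohi hlen hlo hhi
    by_cases h : lo < hi
    · rw [bisectLoop, dif_pos h]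
      simp only
      by_cases hx : x < keys.getD ((lo + hi) / 2) 0
      · rw [if_pos hx]
        exact ih lo ((lo + hi) / 2) (by omega) (by omega) (by omega)
          hlo (fun j hj hjl => lt_of_lt_of_le hx (pairwise_getD_le keys hs hj hjl))
      · rw [if_neg hx]
        rw [Int.not_lt] at hx
        exact ih ((lo + hi) / 2 + 1) hi (by omega) (by omega) hlen
          (fun j hj => le_trans (pairwise_getD_le keys hs (by omega) (by omega)) hx) hhi
    · rw [bisectLoop, dif_neg h]
      exact ⟨by omega, hlo, fun j hj hjl => hhi j (by omega) hjl⟩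

-- takeWhile split point facts
theorem tw_facts (x : Int) (keys : List Int) :
    (keys.takeWhile (fun k => decide (k ≤ x))).length ≤ keys.length ∧
    (∀ j, j < (keys.takeWhile (fun k => decide (k ≤ x))).length → keys.getD j 0 ≤ x) ∧
    ((keys.takeWhile (fun k => decide (k ≤ x))).length < keys.length →
      x < keys.getD (keys.takeWhile (fun k => decide (k ≤ x))).length 0) := by
  induction keys with
  | nil => simp
  | cons k rest ih =>
    by_cases hk : k ≤ x
    · simp only [List.takeWhile_cons, decide_eq_true hk, if_true, List.length_cons]
      refine ⟨by simpa using ih.1, ?_, ?_⟩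
      · intro j hj
        cases j with
        | zero => simpa using hk
        | succ j => exact ih.2.1 j (by simpa using hj)
      · intro hlt
        exact ih.2.2 (by simpa using hlt)
    · simp only [List.takeWhile_cons, decide_eq_false hk]
      exact ⟨by simp, by simp, fun _ => by simpa using lt_of_not_ge hk⟩

-- the binary search equals bisect_right = length of the ≤-prefix, on sorted keys
theorem bisect_eq_tw (keys : List Int) (x : Int) (hs : keys.Pairwise (· ≤ ·)) :
    bisectLoop keys x 0 keys.length = (keys.takeWhile (fun k => decide (k ≤ x))).length := by
  obtain ⟨hr1, hr2, hr3⟩ := bisect_between keys x hs keys.length 0 keys.length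
    (by omega) (by omega) le_rfl (by omega) (by omega)
  obtain ⟨ht1, ht2, ht3⟩ := tw_facts x keys
  set r := bisectLoop keys x 0 keys.length
  set t := (keys.takeWhile (fun k => decide (k ≤ x))).length
  rcases Nat.lt_trichotomy r t with h | h | h
  · exact absurd (ht2 r h) (not_le.mpr (hr3 r le_rfl (by omega)))
  · exact h
  · exact absurd (hr2 t h) (not_le.mpr (ht3 (by omega)))

-- shape of the adjacent swap
theorem pvSwapAdj_eq : ∀ (n : Nat) (l : List (Int × String)), n + 1 < l.length →
    pvSwapAdj l n =
      l.take n ++ l.getD (n + 1) (0, "") :: l.getD n (0, "") :: l.drop (n + 2) := by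
  intro n
  induction n with
  | zero =>
    intro l hl
    match l, hl with
    | a :: b :: rest, _ => simp [pvSwapAdj]
  | succ n ih =>
    intro l hl
    match l, hl with
    | c :: rest, hl =>
      have := ih rest (by simpa using hl)
      simp only [pvSwapAdj, List.getD] at this ⊢
      simp [this]

theorem getD_append_length (xs : List (Int × String)) (y : Int × String)
    (ys : List (Int × String)) : (xs ++ y :: ys).getD xs.length (0, "") = y := by
  induction xs with
  | nil => rfl
  | cons a xs _ => simp

theorem takeWhile_append_false {α : Type} (q : α → Bool) (a : α) (h : q a = false) :
    ∀ P : List α, (P ++ [a]).takeWhile q = P.takeWhile q ∧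
      (P ++ [a]).dropWhile q = P.dropWhile q ++ [a] := by
  intro P
  induction P with
  | nil => simp [List.takeWhile, List.dropWhile, h]
  | cons b P ih =>
    by_cases hb : q b
    · simp [hb, ih.1, ih.2]
    · simp [Bool.of_not_eq_true hb]

-- characterization of A's bubble loop: on a list whose first i elements are sorted,
-- it inserts element i after the ≤-prefix of the sorted part
theorem aInner_char : ∀ (i : Nat) (l : List (Int × String)), i < l.length →
    (l.take i).Pairwise pvR →
    aInner i l =
      (l.take i).takeWhile (pvQ (l.getD i (0, "")).1)
        ++ l.getD i (0, "") ::
          ((l.take i).dropWhile (pvQ (l.getD i (0, "")).1) ++ l.drop (i + 1)) := by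
  intro i
  induction i with
  | zero =>
    intro l hl _
    match l, hl with
    | a :: rest, _ => simp [aInner]
  | succ n ih =>
    intro l hl hsort
    have hgetN : l.getD n (0, "") = l[n] := List.getD_eq_getElem l (0, "") (by omega)
    have hgetS : l.getD (n + 1) (0, "") = l[n + 1] := List.getD_eq_getElem l (0, "") hl
    set key := l.getD (n + 1) (0, "") with hkey
    set a := l.getD n (0, "") with ha
    have htake : l.take (n + 1) = l.take n ++ [a] := by
      rw [List.take_add_one]
      simp [List.getElem?_eq_getElem (show n < l.length by omega), ← hgetN]
    by_cases hcmp : key.1 < a.1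
    · rw [aInner, if_pos hcmp]
      set l' := pvSwapAdj l n with hl'
      have hl'eq : l' = l.take n ++ key :: a :: l.drop (n + 2) := pvSwapAdj_eq n l hl
      have hlen' : n < l'.length := by
        rw [hl'eq]; simp [List.length_take]; omega
      have htake' : l'.take n = l.take n := by
        rw [hl'eq, List.take_append_of_le_length (by simp [List.length_take]; omega),
          List.take_take]
        simp
      have hget' : l'.getD n (0, "") = key := by
        rw [hl'eq]
        have h2 := getD_append_length (l.take n) key (a :: l.drop (n + 2))
        rwa [show (l.take n).length = n by simp; omega] at h2
      have hdrop' : l'.drop (n + 1) = a :: l.drop (n + 2) := by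
        rw [hl'eq, List.drop_append, show (l.take n).length = n by rw [List.length_take]; omega,
          List.drop_eq_nil_of_le (by rw [List.length_take]; omega), show n + 1 - n = 1 by omega]
        simp
      have hsort' : (l'.take n).Pairwise pvR := by
        rw [htake']
        exact hsort.sublist (by rw [htake]; exact (l.take n).sublist_append_left _)
      have := ih l' hlen' hsort'
      rw [this, htake', hget', hdrop']
      have hfalse : pvQ key.1 a = false := by
        simp [pvQ]; omega
      obtain ⟨htw, hdw⟩ := takeWhile_append_false (pvQ key.1) a hfalse (l.take n)
      rw [htake, htw, hdw]
      simp
    · rw [aInner, if_neg hcmp]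
      have hall : ∀ b ∈ l.take (n + 1), pvQ key.1 b = true := by
        intro b hb
        rw [htake] at hb hsort
        rcases List.mem_append.mp hb with hb | hb
        · have hba : pvR b a := by
            rcases List.pairwise_append.mp hsort with ⟨_, _, hcross⟩
            exact hcross b hb a (by simp)
          simp only [pvQ, decide_eq_true_eq]
          have : a.1 ≤ key.1 := by omega
          exact le_trans hba this
        · simp only [List.mem_singleton] at hb
          subst hb
          simp only [pvQ, decide_eq_true_eq]
          omega
      rw [List.takeWhile_eq_self_iff.mpr hall, List.dropWhile_eq_nil_iff.mpr hall]
      calc l = l.take (n + 1) ++ l.drop (n + 1) := (List.take_append_drop _ l).symm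
        _ = l.take (n + 1) ++ key :: l.drop (n + 2) := by
            rw [List.drop_eq_getElem_cons hl, ← hgetS]
        _ = _ := by simp

-- characterization of B's step: the binary search finds the same insertion point
theorem bStep_char (i : Nat) (l : List (Int × String)) (hl : i < l.length)
    (hsort : (l.take i).Pairwise pvR) :
    bStep l i =
      (l.take i).takeWhile (pvQ (l.getD i (0, "")).1)
        ++ l.getD i (0, "") ::
          ((l.take i).dropWhile (pvQ (l.getD i (0, "")).1) ++ l.drop (i + 1)) := by
  set key := l.getD i (0, "") with hkey
  set p := l.take i with hp
  have hplen : p.length = i := by simp [hp]; omega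
  have hkeys : ((p.map Prod.fst).Pairwise (· ≤ ·)) := by
    rw [List.pairwise_map]; exact hsort
  have hklen : (p.map Prod.fst).length = i := by simp [hplen]
  have hpos : bisectLoop (p.map Prod.fst) key.1 0 i =
      (p.takeWhile (pvQ key.1)).length := by
    rw [← hklen, bisect_eq_tw _ _ hkeys, List.takeWhile_map]
    simp only [List.length_map]
    rfl
  have htwlen : (p.takeWhile (pvQ key.1)).length ≤ i := by
    calc (p.takeWhile (pvQ key.1)).length ≤ p.length := (List.takeWhile_prefix _).length_le
      _ = i := hplen
  have htw : p.take (p.takeWhile (pvQ key.1)).length = p.takeWhile (pvQ key.1) :=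
    (List.prefix_iff_eq_take.mp (List.takeWhile_prefix _)).symm
  have hdw : p.drop (p.takeWhile (pvQ key.1)).length = p.dropWhile (pvQ key.1) := by
    have hsplit := List.takeWhile_append_dropWhile (p := pvQ key.1) (l := p)
    set tw := p.takeWhile (pvQ key.1) with htwd
    set dw := p.dropWhile (pvQ key.1) with hdwd
    rw [← hsplit, List.drop_left]
  simp only [bStep]
  rw [← hkey, ← hp, hpos]
  have hlt : l.take (p.takeWhile (pvQ key.1)).length = p.take (p.takeWhile (pvQ key.1)).length := by
    rw [hp, List.take_take, ← hp]
    congr 1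
    omega
  rw [hlt, htw, hdw]

theorem dropWhile_head_false {α : Type} (q : α → Bool) :
    ∀ (p : List α) (h0 : α) (rest : List α), p.dropWhile q = h0 :: rest → q h0 = false := by
  intro p
  induction p with
  | nil => intro h0 rest h; simp at h
  | cons a p ih =>
    intro h0 rest h
    by_cases ha : q a
    · rw [List.dropWhile_cons_of_pos ha] at h
      exact ih h0 rest h
    · rw [List.dropWhile_cons_of_neg ha] at h
      rw [← (List.cons.injEq .. |>.mp h).1]
      exact Bool.of_not_eq_true ha

-- the per-step result keeps the first i+1 elements sorted
theorem insert_sorted (x : Int × String) (p : List (Int × String)) (hs : p.Pairwise pvR) :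
    (p.takeWhile (pvQ x.1) ++ x :: p.dropWhile (pvQ x.1)).Pairwise pvR := by
  rw [List.pairwise_append]
  have hsplit := List.takeWhile_append_dropWhile (p := pvQ x.1) (l := p)
  have hs' : (p.takeWhile (pvQ x.1) ++ p.dropWhile (pvQ x.1)).Pairwise pvR := by
    rw [hsplit]; exact hs
  rcases List.pairwise_append.mp hs' with ⟨htw, hdw, hcross⟩
  have hdwgt : ∀ b ∈ p.dropWhile (pvQ x.1), x.1 < b.1 := by
    intro b hb
    rcases hdwl : p.dropWhile (pvQ x.1) with _ | ⟨h0, rest⟩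
    · rw [hdwl] at hb; simp at hb
    · have hhead : pvQ x.1 h0 = false := dropWhile_head_false _ p h0 rest hdwl
      have hx0 : x.1 < h0.1 := by
        simp only [pvQ, decide_eq_false_iff_not, not_le] at hhead; exact hhead
      rw [hdwl] at hb hdw
      rcases List.mem_cons.mp hb with hb | hb
      · subst hb; exact hx0
      · have : pvR h0 b := (List.pairwise_cons.mp hdw).1 b hb
        calc x.1 < h0.1 := hx0
          _ ≤ b.1 := this
  refine ⟨htw, ?_, ?_⟩
  · rw [List.pairwise_cons]
    exact ⟨fun b hb => le_of_lt (hdwgt b hb), hdw⟩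
  · intro a ha b hb
    rcases List.mem_cons.mp hb with hb | hb
    · subst hb
      have := List.mem_takeWhile_imp ha
      simpa [pvQ, pvR] using this
    · exact hcross a ha b hb

theorem step_eq (i : Nat) (l : List (Int × String)) (hl : i < l.length)
    (hs : (l.take i).Pairwise pvR) : aInner i l = bStep l i := by
  rw [aInner_char i l hl hs, bStep_char i l hl hs]

theorem step_props (i : Nat) (l : List (Int × String)) (hl : i < l.length)
    (hs : (l.take i).Pairwise pvR) :
    (aInner i l).length = l.length ∧ ((aInner i l).take (i + 1)).Pairwise pvR := by
  rw [aInner_char i l hl hs]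
  set key := l.getD i (0, "") with hkey
  set p := l.take i with hp
  have hplen : p.length = i := by rw [hp, List.length_take]; omega
  have hsplitlen : (p.takeWhile (pvQ key.1)).length + (p.dropWhile (pvQ key.1)).length = i := by
    have h := congrArg List.length (List.takeWhile_append_dropWhile (p := pvQ key.1) (l := p))
    rw [List.length_append, hplen] at h
    exact h
  constructor
  · simp only [List.length_append, List.length_cons, List.length_drop]
    omega
  · have hassoc : p.takeWhile (pvQ key.1) ++ key :: (p.dropWhile (pvQ key.1) ++ l.drop (i + 1))
        = (p.takeWhile (pvQ key.1) ++ key :: p.dropWhile (pvQ key.1)) ++ l.drop (i + 1) := by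
      simp
    rw [hassoc, List.take_left' (by simp; omega)]
    exact insert_sorted key p (hp ▸ hs)

theorem fold_eq : ∀ (k s : Nat) (l : List (Int × String)) (out : List (List (Int × String))),
    s + k = l.length → (l.take s).Pairwise pvR →
    (List.range' s k).foldl
      (fun st i => let l' := aInner i st.1; (l', st.2 ++ [l'])) (l, out)
      = (List.range' s k).foldl
      (fun st i => let l' := bStep st.1 i; (l', st.2 ++ [l'])) (l, out) := by
  intro k
  induction k with
  | zero => intro s l out _ _; rfl
  | succ k ih =>
    intro s l out hlen hsort
    have hsl : s < l.length := by omega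
    have heq : aInner s l = bStep l s := step_eq s l hsl hsort
    have hprops := step_props s l hsl hsort
    rw [List.range'_succ]
    simp only [List.foldl_cons, heq]
    exact ih (s + 1) (bStep l s) (out ++ [bStep l s])
      (by rw [← heq, hprops.1]; omega) (heq ▸ hprops.2)

theorem insertion_sort_states_spec : Claim_equal_insertion_sort_states := by
  unfold Claim_equal_insertion_sort_states Spec_insertion_sort_states
  intro pairs _
  unfold insertion_sort_states insertion_sort_states_alt
  by_cases h0 : pairs = []
  · simp [h0]
  · rw [if_neg h0, if_neg h0]
    by_cases h1 : pairs.length = 1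
    · rw [if_pos h1, h1]
      rfl
    · rw [if_neg h1]
      have hge : 1 ≤ pairs.length := by
        cases pairs with
        | nil => exact absurd rfl h0
        | cons a rest => simp
      have hsort1 : (pairs.take 1).Pairwise pvR := by
        cases pairs with
        | nil => simp
        | cons a rest => simp
      rw [fold_eq (pairs.length - 1) 1 pairs [pairs] (by omega) hsort1]
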